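-- pv_equiv track=rewrite | github.com/MeanderingProgrammer/advent-of-code | 2018/18/solver.py | get_end_index
-- ===== SOURCE A (Python) =====
-- def get_end_index(values, start, pattern):
--     pattern_index = 0
--     for i in range(start, len(values)):
--         if values[i] == pattern[pattern_index % len(pattern)]:
--             pattern_index += 1
--         else:
--             return i
--     return len(values)
-- ===== SOURCE B (Python) =====
-- def get_end_index(values, start, pattern):
--     n = len(values)
--     count = n - start
--     if count <= 0:
--         return n
--     # stage 1: materialize the expected cyclic sequence by tiling the pattern
--     reps = -(-count // len(pattern))  # ceiling division
--     expected = (pattern * reps)[:count]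
--     # stage 2: collect all mismatch positions, answer is the first (or n)
--     mismatches = [i for i, p in zip(range(start, n), expected) if values[i] != p]
--     return mismatches[0] if mismatches else n
-- ===== Notes on version B (the rewrite author's own statement) =====
-- stated objective: alternative
-- what changed: Replaces A's single stateful scan with running pattern_index counter and modular lookup by a staged pipeline: materialize the expected cyclic sequence by tiling the pattern (pattern * ceil(count/len(pattern)), truncated), then build the list of all mismatch positions from zipping indices with that tiled sequence, and return its first element (or len(values)); no modular indexing or loop-carried counter remains.
import Mathlib
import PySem

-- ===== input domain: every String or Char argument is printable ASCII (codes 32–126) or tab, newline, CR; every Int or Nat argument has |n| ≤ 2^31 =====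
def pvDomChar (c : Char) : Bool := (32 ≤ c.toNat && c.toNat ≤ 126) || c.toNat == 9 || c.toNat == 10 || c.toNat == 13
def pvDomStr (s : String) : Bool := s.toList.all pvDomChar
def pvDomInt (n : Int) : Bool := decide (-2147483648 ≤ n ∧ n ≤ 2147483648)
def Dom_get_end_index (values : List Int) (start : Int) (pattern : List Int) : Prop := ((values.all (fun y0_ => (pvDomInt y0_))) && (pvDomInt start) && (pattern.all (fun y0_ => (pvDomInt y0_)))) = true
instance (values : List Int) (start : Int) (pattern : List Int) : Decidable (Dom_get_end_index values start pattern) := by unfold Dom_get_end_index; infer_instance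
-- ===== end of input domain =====

-- B replaces A's stateful counter-and-modulo scan by a staged pipeline: tile the pattern
-- into the expected sequence, list all mismatch positions against it, return the first
-- (alternative decomposition, same return values on Pre_).


-- ===== PORT A =====
-- loop over range(start, len(values)) carrying the pattern_index accumulator
def getEndGoA (values pattern : List Int) : List Int → Int → Int
  | [], _ => (values.length : Int)
  | i :: rest, pidx =>
      if PySem.List.pyGet? values i
           = PySem.List.pyGet? pattern (PySem.Int.mod pidx (pattern.length : Int))
      then getEndGoA values pattern rest (pidx + 1)
      else i

def get_end_index (values : List Int) (start : Int) (pattern : List Int) : Int :=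
  getEndGoA values pattern (PySem.List.pyRange start (values.length : Int) 1) 0

-- ===== PORT B =====
-- stage 1: tile the pattern into the expected cyclic sequence (pattern * reps, cut to count;
-- the slice [:count] with 0 < count is List.take); stage 2: list of all mismatch positions
-- from zipping the index range with it; answer = its first element, or n.
def get_end_index_alt (values : List Int) (start : Int) (pattern : List Int) : Int :=
  let n : Int := (values.length : Int)
  let count : Int := n - start
  if count ≤ 0 then n
  else
    let reps : Int := -(PySem.Int.floordiv (-count) (pattern.length : Int))
    let expected : List Int := ((List.replicate reps.toNat pattern).flatten).take count.toNat
    let mismatches : List Int :=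
      (((PySem.List.pyRange start n 1).zip expected).filter
          (fun p => !(PySem.List.pyGet? values p.1 == some p.2))).map Prod.fst
    match mismatches with
    | [] => n
    | i :: _ => i

-- ===== PRECONDITION & SPEC =====
-- Pre_: exactly where Python A returns: either the loop is empty (start ≥ len(values)), or the
-- pattern is nonempty (no ZeroDivisionError) and every visited index is valid (start ≥ -len).
def Pre_get_end_index (values : List Int) (start : Int) (pattern : List Int) : Prop :=
  (values.length : Int) ≤ start ∨ (pattern ≠ [] ∧ -(values.length : Int) ≤ start)
instance (values : List Int) (start : Int) (pattern : List Int) : Decidable (Pre_get_end_index values start pattern) := by unfold Pre_get_end_index; infer_instance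

def pvWitness_get_end_index : List Int × Int × List Int := ([1, 2, 1, 2, 3], 0, [1, 2])

def Spec_get_end_index (values : List Int) (start : Int) (pattern : List Int) (out : Int) : Prop := out = get_end_index_alt values start pattern
instance (values : List Int) (start : Int) (pattern : List Int) (out : Int) : Decidable (Spec_get_end_index values start pattern out) := by unfold Spec_get_end_index; infer_instance

-- ===== CLAIM (what is proved, stated in full; the proofs are below) =====
def Claim_equal_get_end_index : Prop := ∀ (values : List Int) (start : Int) (pattern : List Int), Dom_get_end_index values start pattern → Pre_get_end_index values start pattern → Spec_get_end_index values start pattern (get_end_index values start pattern)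

-- ===== LEMMAS AND PROOFS =====

-- A-side: the loop with accumulator pidx = s - start equals a first-match search.
lemma getEnd_key (values pattern : List Int) (start : Int) :
    ∀ (k : Nat) (s : Int), ((values.length : Int) - s).toNat ≤ k →
      getEndGoA values pattern (PySem.List.pyRange s (values.length : Int) 1) (s - start)
        = (((PySem.List.pyRange s (values.length : Int) 1).find? (fun i =>
            !(PySem.List.pyGet? values i
                == PySem.List.pyGet? pattern (PySem.Int.mod (i - start) (pattern.length : Int))))).getD
            (values.length : Int)) := by
  intro k
  induction k with
  | zero =>
      intro s hs
      have h : (values.length : Int) ≤ s := by omega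
      rw [PySem.List.pyRange_one_eq_nil h]
      simp [getEndGoA]
  | succ k ih =>
      intro s hs
      by_cases h : (values.length : Int) ≤ s
      · rw [PySem.List.pyRange_one_eq_nil h]
        simp [getEndGoA]
      · have hlt : s < (values.length : Int) := by omega
        rw [PySem.List.pyRange_one_cons hlt]
        by_cases heq : PySem.List.pyGet? values s
            = PySem.List.pyGet? pattern (PySem.Int.mod (s - start) (pattern.length : Int))
        · have hb : (!(PySem.List.pyGet? values s
              == PySem.List.pyGet? pattern (PySem.Int.mod (s - start) (pattern.length : Int)))) = false := by
            simp [heq]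
          simp only [getEndGoA, if_pos heq, List.find?_cons, hb]
          have hstep : s - start + 1 = (s + 1) - start := by ring
          rw [hstep]
          exact ih (s + 1) (by omega)
        · have hb : (!(PySem.List.pyGet? values s
              == PySem.List.pyGet? pattern (PySem.Int.mod (s - start) (pattern.length : Int)))) = true := by
            simp [heq]
          simp only [getEndGoA, if_neg heq, List.find?_cons, hb, Option.getD_some]

-- find? only depends on the predicate's values on the list's members.
lemma find?_congr_mem (l : List Int) (p q : Int → Bool)
    (h : ∀ x ∈ l, p x = q x) : l.find? p = l.find? q := by
  induction l with
  | nil => rfl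
  | cons a t ih =>
      simp only [List.find?_cons, h a (List.mem_cons_self ..)]
      cases q a <;> simp [ih (fun x hx => h x (List.mem_cons_of_mem _ hx))]

-- the tiled list reads the pattern cyclically
lemma flatten_replicate_getElem? (pat : List Int) :
    ∀ (r j : Nat), j < r * pat.length →
      ((List.replicate r pat).flatten)[j]? = pat[j % pat.length]? := by
  intro r
  induction r with
  | zero => intro j hj; simp at hj
  | succ r ih =>
      intro j hj
      rw [Nat.succ_mul] at hj
      simp only [List.replicate_succ, List.flatten_cons]
      by_cases h : j < pat.length
      · rw [List.getElem?_append_left h, Nat.mod_eq_of_lt h]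
      · have hL : 0 < pat.length := by
          rcases Nat.eq_zero_or_pos pat.length with h0 | h0
          · rw [h0, Nat.mul_zero] at hj; omega
          · exact h0
        have hge : pat.length ≤ j := by omega
        rw [List.getElem?_append_right hge, ih (j - pat.length) (by omega),
            Nat.mod_eq_sub_mod hge]

-- head of the mapped filtered zip = find? on the first component, when ys tracks g
lemma zipFilterHead (q : Int → Int → Bool) (g : Int → Int) :
    ∀ (xs ys : List Int), xs.length ≤ ys.length →
      (∀ j (h : j < xs.length), ys[j]? = some (g xs[j])) →
      (((xs.zip ys).filter (fun p => q p.1 p.2)).map Prod.fst).head?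
        = xs.find? (fun i => q i (g i)) := by
  intro xs
  induction xs with
  | nil => intro ys _ _; simp
  | cons x xt ih =>
      intro ys hlen hg
      cases ys with
      | nil => simp at hlen
      | cons y yt =>
          have h0 : y = g x := by
            have := hg 0 (by simp)
            simpa using this
          simp only [List.zip_cons_cons, List.filter_cons, List.find?_cons, h0]
          cases hq : q x (g x) with
          | true => simp
          | false =>
              exact ih yt (by simpa using hlen)
                (fun j hj => by simpa using hg (j + 1) (by simpa using Nat.succ_lt_succ hj))

-- ===== VERDICT (by name: the statement is the Claim_ definition above) =====
theorem get_end_index_spec : Claim_equal_get_end_index := by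
  intro values start pattern _ hpre
  unfold Spec_get_end_index get_end_index get_end_index_alt
  have hA := getEnd_key values pattern start ((values.length : Int) - start).toNat start le_rfl
  simp only [sub_self] at hA
  set n : Int := (values.length : Int) with hn
  by_cases hcount : n - start ≤ 0
  · -- empty loop on both sides
    have hle : n ≤ start := by omega
    rw [PySem.List.pyRange_one_eq_nil hle] at hA ⊢
    simp only [if_pos hcount]
    simpa using hA
  · -- nonempty loop: pattern ≠ [] from Pre_
    have hstartlt : start < n := by omega
    have hpat : pattern ≠ [] := by
      rcases hpre with h | ⟨h, _⟩
      · omega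
      · exact h
    have hL : 0 < pattern.length := List.length_pos_iff.mpr hpat
    have hLi : (0 : Int) < (pattern.length : Int) := by exact_mod_cast hL
    simp only [if_neg hcount]
    set count : Int := n - start with hcdef
    set reps : Int := -(PySem.Int.floordiv (-count) (pattern.length : Int)) with hreps
    -- reps is the ceiling of count / len(pattern): count ≤ reps * len(pattern)
    have hceil := (PySem.Int.neg_floordiv_neg_eq_iff_of_pos (a := count)
        (b := (pattern.length : Int)) (q := reps) hLi).mp rfl
    have hcle : count ≤ reps * (pattern.length : Int) := hceil.2
    have hrpos : 0 ≤ reps := by nlinarith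
    have hrepsNat : reps = (reps.toNat : Int) := by omega
    have hcountNat : count = (count.toNat : Int) := by omega
    set expected : List Int := ((List.replicate reps.toNat pattern).flatten).take count.toNat
      with hexp
    have hflatlen : ((List.replicate reps.toNat pattern).flatten).length
        = reps.toNat * pattern.length := by
      simp [List.length_flatten, List.map_replicate, List.sum_replicate]
    have hclen : count.toNat ≤ reps.toNat * pattern.length := by
      have : (count.toNat : Int) ≤ (reps.toNat : Int) * (pattern.length : Int) := by
        rw [← hrepsNat, ← hcountNat]; exact hcle
      exact_mod_cast this
    have hexplen : expected.length = count.toNat := by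
      rw [hexp, List.length_take, hflatlen]; exact Nat.min_eq_left hclen
    have hrange : (PySem.List.pyRange start n 1).length = count.toNat := by
      rw [PySem.List.length_pyRange_one]
    -- B = find? with the stateless tiled predicate
    have hB := zipFilterHead (fun a b => !(PySem.List.pyGet? values a == some b))
        (fun i => pattern.getD ((i - start).toNat % pattern.length) 0)
        (PySem.List.pyRange start n 1) expected
        (by rw [hrange, hexplen])
        (by
          intro j hj
          rw [hrange] at hj
          have hx : (PySem.List.pyRange start n 1)[j] = start + (j : Int) :=
            PySem.List.getElem_pyRange_one ..
          have hjr : j < reps.toNat * pattern.length := by omega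
          have hmem : expected[j]? = pattern[j % pattern.length]? := by
            rw [hexp, List.getElem?_take_of_lt hj, flatten_replicate_getElem? pattern _ _ hjr]
          have hjm : j % pattern.length < pattern.length := Nat.mod_lt _ hL
          have ht : (start + (j : Int) - start).toNat = j := by omega
          simp [hmem, hx, List.getElem?_eq_getElem hjm, List.getD_eq_getElem?_getD])
    -- the two find? predicates agree on the range
    have hsame : (PySem.List.pyRange start n 1).find?
          (fun i => !(PySem.List.pyGet? values i == some
              (pattern.getD ((i - start).toNat % pattern.length) 0)))
        = (PySem.List.pyRange start n 1).find? (fun i =>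
            !(PySem.List.pyGet? values i
                == PySem.List.pyGet? pattern (PySem.Int.mod (i - start) (pattern.length : Int)))) := by
      apply find?_congr_mem
      intro i hi
      have hi' := (PySem.List.mem_pyRange_one).mp hi
      have hjnn : 0 ≤ i - start := by omega
      have hmodeq : PySem.Int.mod (i - start) (pattern.length : Int)
          = (i - start) % (pattern.length : Int) := PySem.Int.mod_eq_emod_of_pos hLi
      have hcast : (i - start) % (pattern.length : Int)
          = (((i - start).toNat % pattern.length : Nat) : Int) := by
        rw [show (i - start) = ((i - start).toNat : Int) by omega]
        push_cast
        rfl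
      have hjm : (i - start).toNat % pattern.length < pattern.length := Nat.mod_lt _ hL
      rw [hmodeq, hcast, PySem.List.pyGet?_natCast]
      simp [List.getElem?_eq_getElem hjm, List.getD_eq_getElem?_getD]
    rw [hsame] at hB
    rw [← hB] at hA
    rw [hA]
    cases ((((PySem.List.pyRange start n 1).zip expected).filter
        (fun p => !(PySem.List.pyGet? values p.1 == some p.2))).map Prod.fst) <;> simp
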